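-- pv_equiv track=rewrite | github.com/linhalien/Optimization | cbus_localsearch_greedy_init_route.py | is_valid_route
-- ===== SOURCE A (Python) =====
-- def is_valid_route(route, n, k):
--     load = 0
--     picked = set()
--
--     for point in route:
--         if point <= n:  # Pickup
--             load += 1
--             picked.add(point)
--         else:  # Drop-off
--             if (point - n) not in picked:
--                 return False
--             load -= 1
--         if load > k:
--             return False
--     return True
-- ===== SOURCE B (Python) =====
-- def is_valid_route(route, n, k):
--     # capacity pass
--     load = 0
--     for point in route:
--         load += 1 if point <= n else -1
--         if load > k:
--             return False
--     # pickup-before-dropoff pass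
--     picked = set()
--     for point in route:
--         if point <= n:
--             picked.add(point)
--         elif (point - n) not in picked:
--             return False
--     return True
-- ===== Notes on version B (the rewrite author's own statement) =====
-- stated objective: alternative
-- what changed: The single fused loop with combined state (load, picked) is split into two independent purpose-specific sweeps: a capacity pass maintaining only the running load, then an ordering pass maintaining only the picked set.
import Mathlib
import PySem

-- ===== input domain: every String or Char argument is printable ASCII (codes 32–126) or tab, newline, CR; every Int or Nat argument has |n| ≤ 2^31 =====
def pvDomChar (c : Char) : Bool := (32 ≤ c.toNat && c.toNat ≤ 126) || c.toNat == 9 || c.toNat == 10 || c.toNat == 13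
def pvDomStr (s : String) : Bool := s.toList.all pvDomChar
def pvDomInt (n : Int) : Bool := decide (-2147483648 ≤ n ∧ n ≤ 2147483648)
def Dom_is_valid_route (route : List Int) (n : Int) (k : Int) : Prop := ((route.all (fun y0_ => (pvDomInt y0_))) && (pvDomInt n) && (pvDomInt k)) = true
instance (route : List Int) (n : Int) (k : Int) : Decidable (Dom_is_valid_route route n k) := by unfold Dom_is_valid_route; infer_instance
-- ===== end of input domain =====

-- B replaces A's single fused loop over (load, picked) with two independent single-purpose
-- sweeps (capacity pass, then pickup-order pass); same O(n) cost, total equivalence proved.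

-- ===== PORT A =====
-- the for-loop of A, with state (load, picked); early 'return False' = result false
def isValidRouteGo (n k : Int) (route : List Int) (load : Int) (picked : PySem.Set Int) : Bool :=
  match route with
  | [] => true
  | point :: rest =>
    if point ≤ n then
      let load := load + 1
      let picked := PySem.Set.add picked point
      if load > k then false else isValidRouteGo n k rest load picked
    else
      if ¬ PySem.Set.contains picked (point - n) then false
      else
        let load := load - 1
        if load > k then false else isValidRouteGo n k rest load picked

def is_valid_route (route : List Int) (n : Int) (k : Int) : Bool :=
  isValidRouteGo n k route 0 PySem.Set.empty

-- ===== PORT B =====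
-- capacity pass: running load only
def loadPass (n k : Int) (route : List Int) (load : Int) : Bool :=
  match route with
  | [] => true
  | point :: rest =>
    let load := load + (if point ≤ n then 1 else -1)
    if load > k then false else loadPass n k rest load

-- ordering pass: picked set only
def pickPass (n : Int) (route : List Int) (picked : PySem.Set Int) : Bool :=
  match route with
  | [] => true
  | point :: rest =>
    if point ≤ n then pickPass n rest (PySem.Set.add picked point)
    else if ¬ PySem.Set.contains picked (point - n) then false
    else pickPass n rest picked

def is_valid_route_alt (route : List Int) (n : Int) (k : Int) : Bool :=
  loadPass n k route 0 && pickPass n route PySem.Set.empty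

-- ===== PRECONDITION & SPEC =====
def Spec_is_valid_route (route : List Int) (n : Int) (k : Int) (out : Bool) : Prop := out = is_valid_route_alt route n k
instance (route : List Int) (n : Int) (k : Int) (out : Bool) : Decidable (Spec_is_valid_route route n k out) := by unfold Spec_is_valid_route; infer_instance

-- ===== CLAIM (what is proved, stated in full; the proofs are below) =====
def Claim_equal_is_valid_route : Prop := ∀ (route : List Int) (n : Int) (k : Int), Dom_is_valid_route route n k → Spec_is_valid_route route n k (is_valid_route route n k)

-- ===== LEMMAS AND PROOFS =====
-- fused loop = conjunction of the two single-purpose passes, for any starting state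
theorem go_eq_passes (n k : Int) (route : List Int) :
    ∀ (load : Int) (picked : PySem.Set Int),
      isValidRouteGo n k route load picked = (loadPass n k route load && pickPass n route picked) := by
  induction route with
  | nil => intro load picked; rfl
  | cons point rest ih =>
    intro load picked
    by_cases hp : point ≤ n
    · simp only [isValidRouteGo, loadPass, pickPass, hp, if_pos]
      by_cases hk : load + 1 > k
      · simp [hk]
      · simp [hk, ih]
    · simp only [isValidRouteGo, loadPass, pickPass, hp, if_neg, if_false,
        show load + -1 = load - 1 from by ring]
      by_cases hm : PySem.Set.contains picked (point - n)
      · by_cases hk : load - 1 > k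
        · simp [hm, hk]
        · simp [hm, hk, ih, Bool.and_left_comm]
      · have hm' : ¬ (point - n ∈ picked) := by simpa [PySem.Set.contains] using hm
        simp [hm']

-- ===== VERDICT (by name: the statement is the Claim_ definition above) =====
theorem is_valid_route_spec : Claim_equal_is_valid_route := by
  intro route n k _
  unfold Spec_is_valid_route is_valid_route is_valid_route_alt
  exact go_eq_passes n k route 0 PySem.Set.empty
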